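-- pv_equiv track=rewrite | github.com/Xyrelln/GA | fitness_functions.py | dna_to_number
-- ===== SOURCE A (Python) =====
-- def binary_to_decimal(dna):
--     result = 0
--
--     i = 0
--     while i < len(dna):
--         result += dna[-1 * i - 1] * 2**i
--         i += 1
--
--     return result
--
-- def dna_to_number(dna):
--     converted_dna = []
--     x = binary_to_decimal([dna[i] for i in range(0, 4)])
--     y = binary_to_decimal([dna[i] for i in range(4, 8)])
--     z = binary_to_decimal([dna[i] for i in range(8, 12)])
--     converted_dna.append(x)
--     converted_dna.append(y)
--     converted_dna.append(z)
--
--     return converted_dna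
-- ===== SOURCE B (Python) =====
-- def dna_to_number(dna):
--     result = []
--     for start in (0, 4, 8):
--         value = 0
--         for j in range(start, start + 4):
--             value = value * 2 + dna[j]
--         result.append(value)
--     return result
-- ===== Notes on version B (the rewrite author's own statement) =====
-- stated objective: alternative
-- what changed: Replaces the reverse-indexed power-of-two weighted sum (dna[-i-1]*2**i per chunk) with a left-to-right Horner accumulator (value = value*2 + bit) over each 4-bit chunk, folding chunk extraction and conversion into one loop over the three start offsets.
import Mathlib
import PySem

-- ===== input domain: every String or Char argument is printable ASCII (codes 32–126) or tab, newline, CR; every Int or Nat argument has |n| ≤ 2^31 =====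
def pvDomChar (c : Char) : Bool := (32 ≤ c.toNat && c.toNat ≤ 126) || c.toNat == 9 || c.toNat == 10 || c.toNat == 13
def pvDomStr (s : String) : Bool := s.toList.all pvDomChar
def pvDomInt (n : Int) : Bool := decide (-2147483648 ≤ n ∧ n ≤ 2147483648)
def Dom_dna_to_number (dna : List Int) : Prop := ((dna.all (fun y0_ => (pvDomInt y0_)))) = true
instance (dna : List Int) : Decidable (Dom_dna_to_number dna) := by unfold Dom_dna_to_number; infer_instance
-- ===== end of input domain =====

-- B replaces the reverse-indexed power-of-two sum with a left-to-right Horner accumulator per 4-bit chunk (alternative decomposition, same cost).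

-- ===== PORT A =====
-- while-loop over i: result += dna[-1*i-1] * 2**i
def binary_to_decimal (dna : List Int) : Int :=
  (PySem.List.pyRange 0 (PySem.List.len dna) 1).foldl
    (fun result i => result + (PySem.List.pyGetD dna (-1 * i - 1) 0) * 2 ^ i.toNat) 0

def dna_to_number (dna : List Int) : List Int :=
  let x := binary_to_decimal ((PySem.List.pyRange 0 4 1).map (fun i => PySem.List.pyGetD dna i 0))
  let y := binary_to_decimal ((PySem.List.pyRange 4 8 1).map (fun i => PySem.List.pyGetD dna i 0))
  let z := binary_to_decimal ((PySem.List.pyRange 8 12 1).map (fun i => PySem.List.pyGetD dna i 0))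
  (([] ++ [x]) ++ [y]) ++ [z]

-- ===== PORT B =====
-- Horner accumulator over each 4-bit chunk, left to right
def chunk_alt (dna : List Int) (start : Int) : Int :=
  (PySem.List.pyRange start (start + 4) 1).foldl
    (fun value j => value * 2 + PySem.List.pyGetD dna j 0) 0

def dna_to_number_alt (dna : List Int) : List Int :=
  ([0, 4, 8] : List Int).foldl (fun result s => result ++ [chunk_alt dna s]) []

-- ===== PRECONDITION & SPEC =====
-- Pre_ excludes lists shorter than 12, on which the Python A raises IndexError.
def Pre_dna_to_number (dna : List Int) : Prop := 12 ≤ dna.length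
instance (dna : List Int) : Decidable (Pre_dna_to_number dna) := by unfold Pre_dna_to_number; infer_instance
def pvWitness_dna_to_number : List Int := [1,0,1,1, 0,1,0,0, 1,1,1,0]
def Spec_dna_to_number (dna : List Int) (out : List Int) : Prop := out = dna_to_number_alt dna
instance (dna : List Int) (out : List Int) : Decidable (Spec_dna_to_number dna out) := by unfold Spec_dna_to_number; infer_instance

-- ===== CLAIM (what is proved, stated in full; the proofs are below) =====
def Claim_equal_dna_to_number : Prop := ∀ (dna : List Int), Dom_dna_to_number dna → Pre_dna_to_number dna → Spec_dna_to_number dna (dna_to_number dna)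

-- ===== LEMMAS AND PROOFS =====

-- ===== VERDICT (by name: the statement is the Claim_ definition above) =====
theorem dna_to_number_spec : Claim_equal_dna_to_number := by
  intro dna _ hpre
  unfold Pre_dna_to_number at hpre
  match dna, hpre with
  | a0::a1::a2::a3::a4::a5::a6::a7::a8::a9::a10::a11::t, _ =>
    show Spec_dna_to_number _ _
    unfold Spec_dna_to_number dna_to_number dna_to_number_alt binary_to_decimal chunk_alt
    simp [PySem.List.pyRange, PySem.List.len, PySem.List.pyGetD, PySem.List.pyGet?,
          PySem.List.pyIdx?, List.range_succ, List.range_zero]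
    refine ⟨?_, ?_, ?_⟩ <;> split_ifs <;> omega
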